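-- pv_equiv track=rewrite | github.com/LarsRhijns/Json-Fuzzer | evaluation_code/MovieRating/Plot-MovieRating-Invalid.py | getySize
-- ===== SOURCE A (Python) =====
-- ySizes = [50, 100, 250, 500, 1000, 5000]
--
-- def getySize (max):
--     size = max;
--     for i in range(0, len(ySizes)):
--         if max < ySizes[i]:
--             return ySizes[i]
--         else:
--             continue
--     return -1
-- ===== SOURCE B (Python) =====
-- import bisect
--
-- ySizes = [50, 100, 250, 500, 1000, 5000]
--
-- def getySize(max):
--     idx = bisect.bisect_right(ySizes, max)
--     return ySizes[idx] if idx < len(ySizes) else -1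
-- ===== Notes on version B (the rewrite author's own statement) =====
-- stated objective: idiomatic
-- what changed: Replaces the sequential scan for the first threshold greater than max with bisect_right binary search over the sorted constant thresholds list.
import Mathlib
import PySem

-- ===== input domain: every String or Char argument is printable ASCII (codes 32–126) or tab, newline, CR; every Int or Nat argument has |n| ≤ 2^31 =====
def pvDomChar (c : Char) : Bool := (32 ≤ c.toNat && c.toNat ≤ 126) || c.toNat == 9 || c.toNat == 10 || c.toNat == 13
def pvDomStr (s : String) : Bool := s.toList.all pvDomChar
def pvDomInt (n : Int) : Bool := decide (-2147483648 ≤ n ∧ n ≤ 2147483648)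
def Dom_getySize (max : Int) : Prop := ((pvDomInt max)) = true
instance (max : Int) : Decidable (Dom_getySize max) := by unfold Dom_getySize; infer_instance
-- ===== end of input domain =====

-- B replaces A's sequential scan of the sorted threshold list with a bisect_right binary search (idiomatic).

-- ===== PORT A =====
def ySizes : List Int := [50, 100, 250, 500, 1000, 5000]

-- A's for-loop over range(0, len(ySizes)) with early return, as structural recursion over the list
def getySizeLoop (max : Int) : List Int → Int
  | [] => -1
  | y :: ys => if max < y then y else getySizeLoop max ys

def getySize (max : Int) : Int := getySizeLoop max ySizes

-- ===== PORT B =====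
-- port of Python's bisect.bisect_right: while lo < hi: mid = (lo+hi)//2; if x < a[mid]: hi = mid else lo = mid+1
-- (the while loop runs at most hi - lo times, so it is written as structural recursion on that count)
def bisectRightAux (a : List Int) (x : Int) : Nat → Nat → Nat → Nat
  | 0, lo, _ => lo
  | fuel + 1, lo, hi =>
    if lo < hi then
      let mid := (lo + hi) / 2
      if x < a.getD mid 0 then bisectRightAux a x fuel lo mid
      else bisectRightAux a x fuel (mid + 1) hi
    else lo

def bisectRight (a : List Int) (x : Int) (lo hi : Nat) : Nat :=
  bisectRightAux a x (hi - lo) lo hi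

def getySize_alt (max : Int) : Int :=
  let idx := bisectRight ySizes max 0 ySizes.length
  if idx < ySizes.length then ySizes.getD idx 0 else -1

-- ===== PRECONDITION & SPEC =====
def Spec_getySize (max : Int) (out : Int) : Prop := out = getySize_alt max
instance (max : Int) (out : Int) : Decidable (Spec_getySize max out) := by unfold Spec_getySize; infer_instance

-- ===== CLAIM (what is proved, stated in full; the proofs are below) =====
def Claim_equal_getySize : Prop := ∀ (max : Int), Dom_getySize max → Spec_getySize max (getySize max)

-- ===== LEMMAS AND PROOFS =====

lemma getySize_char (max : Int) :
    getySize max = if max < 50 then 50 else if max < 100 then 100 else if max < 250 then 250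
      else if max < 500 then 500 else if max < 1000 then 1000 else if max < 5000 then 5000 else -1 := by
  simp [getySize, getySizeLoop, ySizes]

lemma getySize_alt_char (max : Int) :
    getySize_alt max = if max < 50 then 50 else if max < 100 then 100 else if max < 250 then 250
      else if max < 500 then 500 else if max < 1000 then 1000 else if max < 5000 then 5000 else -1 := by
  by_cases h1 : max < 50
  · simp [getySize_alt, ySizes, bisectRight, bisectRightAux, h1, show max < 100 by omega, show max < 500 by omega]
  · by_cases h2 : max < 100
    · simp [getySize_alt, ySizes, bisectRight, bisectRightAux, h1, h2, show max < 500 by omega]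
    · by_cases h3 : max < 250
      · simp [getySize_alt, ySizes, bisectRight, bisectRightAux, h1, h2, h3, show max < 500 by omega]
      · by_cases h4 : max < 500
        · simp [getySize_alt, ySizes, bisectRight, bisectRightAux, h1, h2, h3, h4]
        · by_cases h5 : max < 1000
          · simp [getySize_alt, ySizes, bisectRight, bisectRightAux, h1, h2, h3, h4, h5, show max < 5000 by omega]
          · by_cases h6 : max < 5000
            · simp [getySize_alt, ySizes, bisectRight, bisectRightAux, h1, h2, h3, h4, h5, h6]
            · simp [getySize_alt, ySizes, bisectRight, bisectRightAux, h1, h2, h3, h4, h5, h6]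

-- ===== VERDICT (by name: the statement is the Claim_ definition above) =====
theorem getySize_spec : Claim_equal_getySize := by
  intro max _
  unfold Spec_getySize
  rw [getySize_char, getySize_alt_char]
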